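-- pv_equiv track=rewrite | github.com/zhuxie0719/CodeAgent | agents/code_analysis_agent/agent.py | _identify_architecture_pattern
-- ===== SOURCE A (Python) =====
-- from typing import Dict, List, Any, Optional
--
-- def _identify_architecture_pattern(project_structure: Dict[str, Any], dependencies: Dict[str, Any]) -> str:
--     """识别架构模式"""
--     # 基于目录结构识别
--     files = project_structure.get('files', [])
--
--     # 检查MVC模式
--     mvc_indicators = ['model', 'view', 'controller', 'mvc']
--     has_mvc = any(
--         any(indicator in file['path'].lower() for indicator in mvc_indicators)
--         for file in files
--     )
--     if has_mvc:
--         return 'MVC模式'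
--
--     # 检查微服务架构
--     microservice_indicators = ['service', 'microservice', 'gateway']
--     has_microservice = any(
--         any(indicator in file['path'].lower() for indicator in microservice_indicators)
--         for file in files
--     )
--     if has_microservice:
--         return '微服务架构'
--
--     # 检查分层架构
--     layer_indicators = ['layer', 'tier', 'level']
--     has_layers = any(
--         any(indicator in file['path'].lower() for indicator in layer_indicators)
--         for file in files
--     )
--     if has_layers:
--         return '分层架构'
--
--     return '单体架构'
-- ===== SOURCE B (Python) =====
-- def _identify_architecture_pattern(project_structure, dependencies):
--     """识别架构模式 — single pass over files instead of three scans."""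
--     has_microservice = False
--     has_layers = False
--     for file in project_structure.get('files', []):
--         p = file['path'].lower()
--         if any(ind in p for ind in ('model', 'view', 'controller', 'mvc')):
--             return 'MVC模式'
--         has_microservice = has_microservice or any(
--             ind in p for ind in ('service', 'microservice', 'gateway'))
--         has_layers = has_layers or any(
--             ind in p for ind in ('layer', 'tier', 'level'))
--     if has_microservice:
--         return '微服务架构'
--     if has_layers:
--         return '分层架构'
--     return '单体架构'
-- ===== Notes on version B (the rewrite author's own statement) =====
-- stated objective: alternative
-- what changed: Replaces A's three sequential any-scans over the file list (one per pattern family) with one single pass that returns 'MVC模式' on the first MVC hit and folds the microservice/layer membership tests into two accumulator flags resolved after the loop.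
import Mathlib
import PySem

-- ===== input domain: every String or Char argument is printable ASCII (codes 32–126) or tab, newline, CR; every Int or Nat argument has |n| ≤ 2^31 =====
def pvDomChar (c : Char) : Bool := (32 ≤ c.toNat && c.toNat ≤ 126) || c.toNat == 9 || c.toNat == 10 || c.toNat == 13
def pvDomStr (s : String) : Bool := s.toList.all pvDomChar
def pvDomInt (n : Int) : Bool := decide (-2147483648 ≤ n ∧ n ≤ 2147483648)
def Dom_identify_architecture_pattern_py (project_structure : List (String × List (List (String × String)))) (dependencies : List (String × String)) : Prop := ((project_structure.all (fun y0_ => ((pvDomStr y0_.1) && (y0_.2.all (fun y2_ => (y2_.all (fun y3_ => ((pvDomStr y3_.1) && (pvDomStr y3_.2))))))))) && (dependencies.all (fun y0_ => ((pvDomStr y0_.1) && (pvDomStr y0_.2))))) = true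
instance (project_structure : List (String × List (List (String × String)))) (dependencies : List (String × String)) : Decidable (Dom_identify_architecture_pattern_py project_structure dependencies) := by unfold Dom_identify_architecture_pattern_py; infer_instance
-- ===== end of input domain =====

-- B replaces A's three sequential any-scans over the files by ONE pass with an early
-- return on the first MVC hit and two accumulator flags; return values only (no mutation).

-- shared helpers: file['path'].lower() (the .getD "" arm is only reached where Python
-- raises KeyError, which Pre_ excludes) and 'any(ind in p for ind in inds)'
def pvPathOf (f : List (String × String)) : String :=
  PySem.Str.lower (((PySem.Dict.mk f).get? "path").getD "")

def pvIndHit (p : String) (inds : List String) : Bool :=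
  inds.any (fun ind => PySem.Str.isIn ind p)

-- ===== PORT A =====
def identify_architecture_pattern_py (project_structure : List (String × List (List (String × String)))) (dependencies : List (String × String)) : String :=
  let files := (PySem.Dict.mk project_structure).getD "files" []
  let has_mvc := files.any (fun file => pvIndHit (pvPathOf file) ["model", "view", "controller", "mvc"])
  if has_mvc then "MVC模式"
  else
    let has_microservice := files.any (fun file => pvIndHit (pvPathOf file) ["service", "microservice", "gateway"])
    if has_microservice then "微服务架构"
    else
      let has_layers := files.any (fun file => pvIndHit (pvPathOf file) ["layer", "tier", "level"])
      if has_layers then "分层架构"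
      else "单体架构"

-- ===== PORT B =====
def pvAltLoop : List (List (String × String)) → Bool → Bool → String
  | [], has_microservice, has_layers =>
      if has_microservice then "微服务架构"
      else if has_layers then "分层架构"
      else "单体架构"
  | file :: rest, has_microservice, has_layers =>
      let p := pvPathOf file
      if pvIndHit p ["model", "view", "controller", "mvc"] then "MVC模式"
      else pvAltLoop rest
        (has_microservice || pvIndHit p ["service", "microservice", "gateway"])
        (has_layers || pvIndHit p ["layer", "tier", "level"])

def identify_architecture_pattern_py_alt (project_structure : List (String × List (List (String × String)))) (dependencies : List (String × String)) : String :=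
  pvAltLoop ((PySem.Dict.mk project_structure).getD "files" []) false false

-- ===== PRECONDITION & SPEC =====
-- Pre_ excludes exactly the inputs on which Python A raises KeyError: a file dict without
-- a 'path' key that is reached before any MVC-matching file (both A and B raise there).
def Pre_identify_architecture_pattern_py (project_structure : List (String × List (List (String × String)))) (dependencies : List (String × String)) : Prop :=
  let files := (PySem.Dict.mk project_structure).getD "files" []
  ∀ i < files.length, (files[i]?.elim true (fun f => (PySem.Dict.mk f).contains "path")) = false →
    ∃ j < i, (files[j]?.elim false (fun f =>
      ((PySem.Dict.mk f).get? "path").elim false (fun p =>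
        pvIndHit (PySem.Str.lower p) ["model", "view", "controller", "mvc"]))) = true
instance (project_structure : List (String × List (List (String × String)))) (dependencies : List (String × String)) : Decidable (Pre_identify_architecture_pattern_py project_structure dependencies) := by unfold Pre_identify_architecture_pattern_py; infer_instance

def pvWitness_identify_architecture_pattern_py : (List (String × List (List (String × String)))) × (List (String × String)) :=
  ([("files", [[("path", "src/Service/userModel.py")], [("path", "app/gateway.py")]])], [("a", "b")])

def Spec_identify_architecture_pattern_py (project_structure : List (String × List (List (String × String)))) (dependencies : List (String × String)) (out : String) : Prop := out = identify_architecture_pattern_py_alt project_structure dependencies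
instance (project_structure : List (String × List (List (String × String)))) (dependencies : List (String × String)) (out : String) : Decidable (Spec_identify_architecture_pattern_py project_structure dependencies out) := by unfold Spec_identify_architecture_pattern_py; infer_instance

-- ===== CLAIM (what is proved, stated in full; the proofs are below) =====
def Claim_equal_identify_architecture_pattern_py : Prop := ∀ (project_structure : List (String × List (List (String × String)))) (dependencies : List (String × String)), Dom_identify_architecture_pattern_py project_structure dependencies → Pre_identify_architecture_pattern_py project_structure dependencies → Spec_identify_architecture_pattern_py project_structure dependencies (identify_architecture_pattern_py project_structure dependencies)

-- ===== LEMMAS AND PROOFS =====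

-- B's single loop, run from any accumulator state, equals A's three-scan shape.
lemma pvAltLoop_eq (files : List (List (String × String))) (ms ly : Bool) :
    pvAltLoop files ms ly =
      (if files.any (fun file => pvIndHit (pvPathOf file) ["model", "view", "controller", "mvc"]) then "MVC模式"
       else if ms || files.any (fun file => pvIndHit (pvPathOf file) ["service", "microservice", "gateway"]) then "微服务架构"
       else if ly || files.any (fun file => pvIndHit (pvPathOf file) ["layer", "tier", "level"]) then "分层架构"
       else "单体架构") := by
  induction files generalizing ms ly with
  | nil => simp [pvAltLoop]
  | cons f rest ih =>
      simp only [pvAltLoop, List.any_cons]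
      by_cases h : pvIndHit (pvPathOf f) ["model", "view", "controller", "mvc"] = true
      · simp [h]
      · simp only [Bool.not_eq_true] at h
        rw [h, ih]
        simp [Bool.or_assoc]

-- ===== VERDICT (by name: the statement is the Claim_ definition above) =====
theorem identify_architecture_pattern_py_spec : Claim_equal_identify_architecture_pattern_py := by
  intro project_structure dependencies _ _
  unfold Spec_identify_architecture_pattern_py identify_architecture_pattern_py identify_architecture_pattern_py_alt
  rw [pvAltLoop_eq]
  simp
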